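-- pv_equiv track=rewrite | github.com/robert-lamprecht/Tmaze-toolkit | tmaze_toolkit/processing/extractTrialTimes.py | pad_movement
-- ===== SOURCE A (Python) =====
-- def pad_movement(floor, window_pad):
--     """
--     Pad floor movement signal to handle noisy data and direction changes.
--     Uses a sliding window approach to connect nearby movements.
--
--     Args:
--         floor (list): Binary floor movement signal
--         window_pad (int): Window size for padding
--
--     Returns:
--         list: Padded floor movement signal
--     """
--     padded_floor = floor.copy()
--
--     # First pass: forward padding
--     for x in range(len(floor) - window_pad):
--         if floor[x] == 1:
--             # Look ahead for any movement within window
--             for y in range(x + 1, min(x + window_pad, len(floor))):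
--                 if floor[y] == 1:
--                     # Fill all gaps between movements
--                     for z in range(x + 1, y):
--                         padded_floor[z] = 1
--                     break
--
--     # Second pass: backward padding to catch reversed movements
--     for x in range(len(floor) - 1, window_pad, -1):
--         if padded_floor[x] == 1:
--             # Look backward for any movement within window
--             for y in range(x - 1, max(x - window_pad, -1), -1):
--                 if padded_floor[y] == 1:
--                     # Fill all gaps between movements
--                     for z in range(x - 1, y, -1):
--                         padded_floor[z] = 1
--                     break
--
--     # Third pass: clean up isolated movements
--     # If a movement is isolated (no other movements within window_pad), remove it
--     for x in range(window_pad, len(padded_floor) - window_pad):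
--         if padded_floor[x] == 1:
--             # Check if there are any other movements in the window
--             has_neighbor = False
--             for y in range(x - window_pad, x + window_pad + 1):
--                 if y != x and padded_floor[y] == 1:
--                     has_neighbor = True
--                     break
--             if not has_neighbor:
--                 padded_floor[x] = 0
--
--     return padded_floor
-- ===== SOURCE B (Python) =====
-- def pad_movement(floor, window_pad):
--     """Re-implementation that works on the positions of the 1s instead of
--     scanning a window at every index.
--
--     Pass 1 and pass 2 fill the gap between consecutive 1s when the gap is
--     small enough and the pass-specific boundary condition holds; pass 3 drops
--     isolated 1s using nearest-1 indices precomputed in two linear scans.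
--     """
--     n = len(floor)
--
--     # pass 1: fill between consecutive 1s of the original signal
--     p = list(floor)
--     ones = [i for i, v in enumerate(floor) if v == 1]
--     for a, b in zip(ones, ones[1:]):
--         if a < n - window_pad and b - a < window_pad:
--             for z in range(a + 1, b):
--                 p[z] = 1
--
--     # pass 2: fill between consecutive 1s of the pass-1 result
--     q = list(p)
--     ones = [i for i, v in enumerate(p) if v == 1]
--     for a, b in zip(ones, ones[1:]):
--         if b >= window_pad + 1 and b - a < window_pad:
--             for z in range(a + 1, b):
--                 q[z] = 1
--
--     # pass 3: drop isolated 1s; nearest-1 neighbours from two linear scans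
--     left = [None] * n   # index of the nearest 1 strictly left of i
--     last = None
--     for i in range(n):
--         left[i] = last
--         if q[i] == 1:
--             last = i
--     right = [None] * n  # index of the nearest 1 strictly right of i
--     last = None
--     for i in range(n - 1, -1, -1):
--         right[i] = last
--         if q[i] == 1:
--             last = i
--
--     out = list(q)
--     for i in range(n):
--         if q[i] == 1 and window_pad <= i < n - window_pad:
--             near = (left[i] is not None and i - left[i] <= window_pad) or \
--                    (right[i] is not None and right[i] - i <= window_pad)
--             if not near:
--                 out[i] = 0
--     return out
-- ===== Notes on version B (the rewrite author's own statement) =====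
-- stated objective: alternative
-- what changed: B works on the positions of the 1s instead of scanning a window at every index: passes 1-2 fill gaps between consecutive 1s taken from a precomputed position list, and pass 3 drops isolated 1s using nearest-1 neighbour indices from two linear sweeps; it trades A's per-index window scans for extra position/neighbour bookkeeping.
import Mathlib
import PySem

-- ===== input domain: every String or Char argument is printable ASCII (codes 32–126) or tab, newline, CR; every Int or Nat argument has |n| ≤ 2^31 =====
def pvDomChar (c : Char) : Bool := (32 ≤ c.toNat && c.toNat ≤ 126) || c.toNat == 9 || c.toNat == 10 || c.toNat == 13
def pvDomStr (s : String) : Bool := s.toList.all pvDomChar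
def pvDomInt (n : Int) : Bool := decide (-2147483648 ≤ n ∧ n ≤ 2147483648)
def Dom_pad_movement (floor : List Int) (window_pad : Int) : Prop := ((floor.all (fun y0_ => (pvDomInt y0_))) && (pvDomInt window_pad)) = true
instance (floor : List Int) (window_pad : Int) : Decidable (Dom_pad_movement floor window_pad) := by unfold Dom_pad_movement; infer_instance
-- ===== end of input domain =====

-- B replaces A's per-index window scans by scans over the positions of the 1s
-- (consecutive-1 gap filling and precomputed nearest-1 neighbours); objective: alternative algorithm.
-- Equivalence is about the return value only (neither program mutates its arguments).

-- ===== PORT A =====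

-- 'for z in range(a, b, step): arr[z] = 1'  (shared literal helper for the fill loops of both programs)
def pvFill (p : List Int) (zs : List Int) : List Int :=
  zs.foldl (fun acc z => PySem.List.pySetD acc z 1) p

-- pass 1 inner loop: 'for y in range(x+1, min(x+wp, n)): if floor[y]==1: fill; break'
def aLook1 (floor p : List Int) (x stop y : Int) : List Int :=
  if y < stop then
    if PySem.List.pyGetD floor y 0 = 1 then pvFill p (PySem.List.pyRange (x + 1) y 1)
    else aLook1 floor p x stop (y + 1)
  else p
termination_by (stop - y).toNat
decreasing_by omega

def aPass1 (floor : List Int) (wp n : Int) : List Int :=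
  (PySem.List.pyRange 0 (n - wp) 1).foldl
    (fun p x =>
      if PySem.List.pyGetD floor x 0 = 1 then aLook1 floor p x (min (x + wp) n) (x + 1) else p)
    floor

-- pass 2 inner loop: 'for y in range(x-1, max(x-wp, -1), -1): if padded[y]==1: fill; break'
def aLook2 (c : List Int) (x stop y : Int) : List Int :=
  if y > stop then
    if PySem.List.pyGetD c y 0 = 1 then pvFill c (PySem.List.pyRange (x - 1) y (-1))
    else aLook2 c x stop (y - 1)
  else c
termination_by (y - stop).toNat
decreasing_by omega

-- pass 2 outer loop: 'for x in range(len(floor)-1, window_pad, -1)'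
def aPass2 (wp : Int) (c : List Int) (x : Int) : List Int :=
  if x > wp then
    aPass2 wp
      (if PySem.List.pyGetD c x 0 = 1 then aLook2 c x (max (x - wp) (-1)) (x - 1) else c)
      (x - 1)
  else c
termination_by (x - wp).toNat
decreasing_by omega

-- pass 3 inner loop: 'for y in range(x-wp, x+wp+1): if y != x and padded[y]==1: has_neighbor=True; break'
def aHasNb (c : List Int) (x stop y : Int) : Bool :=
  if y < stop then
    if y ≠ x ∧ PySem.List.pyGetD c y 0 = 1 then true else aHasNb c x stop (y + 1)
  else false
termination_by (stop - y).toNat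
decreasing_by omega

def aPass3 (wp n : Int) (c0 : List Int) : List Int :=
  (PySem.List.pyRange wp (n - wp) 1).foldl
    (fun c x =>
      if PySem.List.pyGetD c x 0 = 1 then
        if aHasNb c x (x + wp + 1) (x - wp) then c else PySem.List.pySetD c x 0
      else c)
    c0

def pad_movement (floor : List Int) (window_pad : Int) : List Int :=
  let n := PySem.List.len floor
  aPass3 window_pad n (aPass2 window_pad (aPass1 floor window_pad n) (n - 1))

-- ===== PORT B =====

-- '[i for i, v in enumerate(l) if v == 1]'
def bOnes (l : List Int) : List Int :=
  (PySem.List.enumerate l).filterMap (fun iv => if iv.2 = 1 then some iv.1 else none)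

def bPass1 (floor : List Int) (wp n : Int) : List Int :=
  ((bOnes floor).zip (bOnes floor).tail).foldl
    (fun p ab =>
      if ab.1 < n - wp ∧ ab.2 - ab.1 < wp then pvFill p (PySem.List.pyRange (ab.1 + 1) ab.2 1)
      else p)
    floor

def bPass2 (p : List Int) (wp : Int) : List Int :=
  ((bOnes p).zip (bOnes p).tail).foldl
    (fun q ab =>
      if wp + 1 ≤ ab.2 ∧ ab.2 - ab.1 < wp then pvFill q (PySem.List.pyRange (ab.1 + 1) ab.2 1)
      else q)
    p

-- 'left = [None]*n; last = None; for i in range(n): left[i] = last; if q[i]==1: last = i'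
def bLeft (q : List Int) (n : Int) : List (Option Int) :=
  ((PySem.List.pyRange 0 n 1).foldl
    (fun st i =>
      (PySem.List.pySetD st.1 i st.2, if PySem.List.pyGetD q i 0 = 1 then some i else st.2))
    (List.replicate n.toNat none, none)).1

-- same, 'for i in range(n-1, -1, -1)'
def bRight (q : List Int) (n : Int) : List (Option Int) :=
  ((PySem.List.pyRange (n - 1) (-1) (-1)).foldl
    (fun st i =>
      (PySem.List.pySetD st.1 i st.2, if PySem.List.pyGetD q i 0 = 1 then some i else st.2))
    (List.replicate n.toNat none, none)).1

def bPass3 (q : List Int) (wp n : Int) : List Int :=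
  let left := bLeft q n
  let right := bRight q n
  (PySem.List.pyRange 0 n 1).foldl
    (fun out i =>
      if PySem.List.pyGetD q i 0 = 1 ∧ wp ≤ i ∧ i < n - wp then
        if (match PySem.List.pyGetD left i none with
            | some j => decide (i - j ≤ wp)
            | none => false) ||
           (match PySem.List.pyGetD right i none with
            | some j => decide (j - i ≤ wp)
            | none => false) then out
        else PySem.List.pySetD out i 0
      else out)
    q

def pad_movement_alt (floor : List Int) (window_pad : Int) : List Int :=
  let n := PySem.List.len floor
  bPass3 (bPass2 (bPass1 floor window_pad n) window_pad) window_pad n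

-- ===== PRECONDITION & SPEC =====
-- A raises IndexError for every negative window_pad (pass 1 indexes past the end); Pre_ excludes exactly those inputs.
def Pre_pad_movement (floor : List Int) (window_pad : Int) : Prop := 0 ≤ window_pad
instance (floor : List Int) (window_pad : Int) : Decidable (Pre_pad_movement floor window_pad) := by
  unfold Pre_pad_movement; infer_instance

def pvWitness_pad_movement : List Int × Int := ([1, 0, 1, 0, 0, 1], 2)

def Spec_pad_movement (floor : List Int) (window_pad : Int) (out : List Int) : Prop := out = pad_movement_alt floor window_pad
instance (floor : List Int) (window_pad : Int) (out : List Int) : Decidable (Spec_pad_movement floor window_pad out) := by unfold Spec_pad_movement; infer_instance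

-- ===== CLAIM (what is proved, stated in full; the proofs are below) =====
def Claim_equal_pad_movement : Prop := ∀ (floor : List Int) (window_pad : Int), Dom_pad_movement floor window_pad → Pre_pad_movement floor window_pad → Spec_pad_movement floor window_pad (pad_movement floor window_pad)
-- ===== LEMMAS AND PROOFS =====

-- `pvOne q k`: position k holds a literal 1 (reads as Python's `q[k] == 1` for in-range k, False past the end)
def pvOne (q : List Int) (k : Nat) : Prop := q.getD k 0 = 1

theorem pvOne_lt_length {q : List Int} {k : Nat} (h : pvOne q k) : k < q.length := by
  by_contra hk
  simp [pvOne, List.getD, List.getElem?_eq_none_iff.mpr (by omega : q.length ≤ k)] at h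

-- pointwise description of an overwrite: c is p with value v written exactly at the positions satisfying P
def PW (c p : List Int) (P : Nat → Prop) (v : Int) : Prop :=
  c.length = p.length ∧ ∀ k : Nat, (P k → c.getD k 0 = v) ∧ (¬ P k → c.getD k 0 = p.getD k 0)

theorem PW_congr {c p : List Int} {P Q : Nat → Prop} {v : Int}
    (h : PW c p P v) (hiff : ∀ k, P k ↔ Q k) : PW c p Q v := by
  refine ⟨h.1, fun k => ⟨fun hq => (h.2 k).1 ((hiff k).mpr hq), fun hq => (h.2 k).2 (fun hp => hq ((hiff k).mp hp))⟩⟩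

theorem eq_of_PW {c c' p : List Int} {P : Nat → Prop} {v : Int}
    (h : PW c p P v) (h' : PW c' p P v) : c = c' := by
  have hlen : c.length = c'.length := h.1.trans h'.1.symm
  have hgd : ∀ k : Nat, c.getD k 0 = c'.getD k 0 := by
    intro k
    by_cases hp : P k
    · rw [(h.2 k).1 hp, (h'.2 k).1 hp]
    · rw [(h.2 k).2 hp, (h'.2 k).2 hp]
  apply List.ext_getElem hlen
  intro i h1 h2
  have := hgd i
  rwa [List.getD_eq_getElem c 0 h1, List.getD_eq_getElem c' 0 h2] at this

theorem getD_set {α : Type} (l : List α) (j : Nat) (v d : α) (k : Nat) :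
    (l.set j v).getD k d = if k = j ∧ k < l.length then v else l.getD k d := by
  by_cases hk : k < l.length
  · by_cases hj : k = j
    · subst hj; simp [List.getD, List.getElem?_set, hk]
    · simp [List.getD, List.getElem?_set, hj, Ne.symm hj, hk]
  · have h1 : l.length ≤ k := by omega
    have h2 : (l.set j v).length ≤ k := by simpa using h1
    simp [List.getD, List.getElem?_eq_none_iff.mpr h1, List.getElem?_eq_none_iff.mpr h2, hk]

-- pyGetD at a nonnegative index is getD at the Nat index
theorem pyGetD_toNat {α : Type} (l : List α) (i : Int) (d : α) (h : 0 ≤ i) :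
    PySem.List.pyGetD l i d = l.getD i.toNat d := by
  have hi : i = ((i.toNat : Nat) : Int) := by omega
  rw [hi, PySem.List.pyGetD_natCast]
  have hmax : max i 0 = i := by omega
  simp [List.getD]
  rw [hmax]

theorem length_pvFill (p zs : List Int) : (pvFill p zs).length = p.length := by
  induction zs generalizing p with
  | nil => rfl
  | cons z zs ih => simp [pvFill, List.foldl_cons] at *; rw [ih]; simp [PySem.List.length_pySetD]

theorem getD_pvFill (p zs : List Int) (hz : ∀ z ∈ zs, 0 ≤ z) (k : Nat) :
    (pvFill p zs).getD k 0 = if (k : Int) ∈ zs ∧ k < p.length then 1 else p.getD k 0 := by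
  induction zs generalizing p with
  | nil => simp [pvFill]
  | cons z zs ih =>
    have hz0 : 0 ≤ z := hz z (by simp)
    have hstep : pvFill p (z :: zs) = pvFill (p.set z.toNat 1) zs := by
      simp [pvFill, List.foldl_cons, PySem.List.pySetD_of_nonneg (i := z) (h := hz0)]
    rw [hstep, ih _ (fun a ha => hz a (by simp [ha]))]
    rw [getD_set]
    have hlen : (p.set z.toNat 1).length = p.length := by simp
    simp only [hlen, List.mem_cons]
    have h5 : max z 0 = z := by omega
    by_cases h3 : (k : Int) = z
    · have h4 : k = z.toNat := by omega
      by_cases h1 : (k : Int) ∈ zs <;> by_cases h2 : k < p.length <;>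
        simp_all [h5] <;> omega
    · have h4 : ¬ k = z.toNat := by omega
      by_cases h1 : (k : Int) ∈ zs <;> by_cases h2 : k < p.length <;>
        simp_all [h5] <;> omega

-- a fold of steps each of which writes v exactly on its own condition writes v on the union
theorem foldl_cw {ι : Type} (xs : List ι) (f : List Int → ι → List Int) (C : ι → Nat → Prop) (v : Int)
    (hf : ∀ p i, i ∈ xs → PW (f p i) p (fun k => C i k ∧ k < p.length) v) :
    ∀ p, PW (xs.foldl f p) p (fun k => (∃ i ∈ xs, C i k) ∧ k < p.length) v := by
  induction xs with
  | nil => intro p; exact ⟨rfl, fun k => ⟨fun h => by simp at h, fun _ => rfl⟩⟩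
  | cons x xs ih =>
    intro p
    have hstep := hf p x (by simp)
    have ihh := ih (fun p i hi => hf p i (by simp [hi])) (f p x)
    have hlen : (f p x).length = p.length := hstep.1
    refine ⟨by rw [List.foldl_cons, ihh.1, hlen], fun k => ⟨?_, ?_⟩⟩
    · rintro ⟨⟨i, hi, hC⟩, hk⟩
      rw [List.foldl_cons]
      rcases List.mem_cons.mp hi with rfl | hi'
      · by_cases he : ∃ i ∈ xs, C i k
        · exact (ihh.2 k).1 ⟨he, by omega⟩
        · rw [(ihh.2 k).2 (by simp [he])]
          exact (hstep.2 k).1 ⟨hC, hk⟩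
      · exact (ihh.2 k).1 ⟨⟨i, hi', hC⟩, by omega⟩
    · intro hno
      rw [List.foldl_cons]
      by_cases hk : k < p.length
      · have h1 : ¬ (∃ i ∈ xs, C i k) := fun ⟨i, hi, hC⟩ => hno ⟨⟨i, by simp [hi], hC⟩, hk⟩
        rw [(ihh.2 k).2 (by simp [h1]), (hstep.2 k).2 (fun ⟨hC, _⟩ => hno ⟨⟨x, by simp, hC⟩, hk⟩)]
      · have h1 : ¬ ((∃ i ∈ xs, C i k) ∧ k < (f p x).length) := by rw [hlen]; tauto
        rw [(ihh.2 k).2 h1, (hstep.2 k).2 (by tauto)]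

-- ---------- pass 1 ----------

-- `iOne l i`: Python's `l[i] == 1` read at an Int index (used at nonnegative indices only)
def iOne (l : List Int) (i : Int) : Prop := PySem.List.pyGetD l i 0 = 1

theorem iOne_iff_pvOne {l : List Int} {i : Int} (h : 0 ≤ i) : iOne l i ↔ pvOne l i.toNat := by
  rw [iOne, pvOne, pyGetD_toNat _ _ _ h]

-- a CONSECUTIVE pair of 1s: both positions hold 1 and no position strictly between does
def CPair (p : List Int) (a b : Nat) : Prop :=
  a < b ∧ b < p.length ∧ pvOne p a ∧ pvOne p b ∧ ∀ c : Nat, a < c → c < b → ¬ pvOne p c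

-- positions filled by pass 1: interiors of consecutive pairs at distance < wp whose left end is < n - wp
def F1 (floor : List Int) (wp : Int) (k : Nat) : Prop :=
  ∃ a b : Nat, CPair floor a b ∧ (a : Int) < (floor.length : Int) - wp ∧
    (b : Int) - (a : Int) < wp ∧ a < k ∧ k < b

theorem PW_of_no_write {p : List Int} {P : Nat → Prop} {v : Int} (h : ∀ k, ¬ P k) : PW p p P v :=
  ⟨rfl, fun k => ⟨fun hk => absurd hk (h k), fun _ => rfl⟩⟩

theorem aLook1_PW (floor p : List Int) (x stop y : Int) (hx : 0 ≤ x) (hxy : x < y) :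
    PW (aLook1 floor p x stop y) p
      (fun k => (∃ w : Int, y ≤ w ∧ w < stop ∧ iOne floor w ∧
        (∀ c : Int, y ≤ c → c < w → ¬ iOne floor c) ∧ x < (k : Int) ∧ (k : Int) < w) ∧
        k < p.length) 1 := by
  fun_induction aLook1 floor p x stop y with
  | case1 y hlt hone =>
    refine ⟨length_pvFill _ _, fun k => ?_⟩
    have hz : ∀ z ∈ PySem.List.pyRange (x + 1) y 1, 0 ≤ z := by
      intro z hzm; have := PySem.List.mem_pyRange_one.mp hzm; omega
    rw [getD_pvFill _ _ hz k]
    constructor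
    · rintro ⟨⟨w, hw1, hw2, hw3, hw4, hk1, hk2⟩, hk3⟩
      have hwy : w = y := by
        by_contra hne
        exact hw4 y (le_refl y) (by omega) hone
      rw [if_pos ⟨PySem.List.mem_pyRange_one.mpr ⟨by omega, by omega⟩, hk3⟩]
    · intro hno
      rw [if_neg]
      rintro ⟨hmem, hk3⟩
      have := PySem.List.mem_pyRange_one.mp hmem
      exact hno ⟨⟨y, le_refl y, hlt, hone, fun c hc1 hc2 => by omega, by omega, by omega⟩, hk3⟩
  | case2 y hlt hone ih =>
    refine PW_congr (ih (by omega)) (fun k => ?_)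
    constructor
    · rintro ⟨⟨w, hw1, hw2, hw3, hw4, hk1, hk2⟩, hk3⟩
      refine ⟨⟨w, by omega, hw2, hw3, fun c hc1 hc2 => ?_, hk1, hk2⟩, hk3⟩
      by_cases hcy : c = y
      · rw [hcy]; exact hone
      · exact hw4 c (by omega) hc2
    · rintro ⟨⟨w, hw1, hw2, hw3, hw4, hk1, hk2⟩, hk3⟩
      have hwy : w ≠ y := fun h => hone (h ▸ hw3)
      exact ⟨⟨w, by omega, hw2, hw3, fun c hc1 hc2 => hw4 c (by omega) hc2, hk1, hk2⟩, hk3⟩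
  | case3 y hge =>
    exact PW_of_no_write (fun k => by rintro ⟨⟨w, hw1, hw2, _⟩, _⟩; omega)

-- the per-x condition of A's first pass
def C1 (floor : List Int) (wp n : Int) (x : Int) (k : Nat) : Prop :=
  iOne floor x ∧ ∃ w : Int, x + 1 ≤ w ∧ w < min (x + wp) n ∧ iOne floor w ∧
    (∀ c : Int, x + 1 ≤ c → c < w → ¬ iOne floor c) ∧ x < (k : Int) ∧ (k : Int) < w

theorem aPass1_PW (floor : List Int) (wp n : Int) :
    PW (aPass1 floor wp n) floor
      (fun k => (∃ x ∈ PySem.List.pyRange 0 (n - wp) 1, C1 floor wp n x k) ∧ k < floor.length) 1 := by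
  apply foldl_cw
  intro p i hi
  have hi0 : 0 ≤ i := (PySem.List.mem_pyRange_one.mp hi).1
  by_cases hone : PySem.List.pyGetD floor i 0 = 1
  · simp only [hone, if_pos]
    refine PW_congr (aLook1_PW floor p i (min (i + wp) n) (i + 1) hi0 (by omega)) (fun k => ?_)
    unfold C1 iOne
    constructor
    · rintro ⟨⟨w, hw⟩, hk⟩; exact ⟨⟨hone, w, hw⟩, hk⟩
    · rintro ⟨⟨_, w, hw⟩, hk⟩; exact ⟨⟨w, hw⟩, hk⟩
  · simp only [hone, if_neg, if_false]
    exact PW_of_no_write (fun k => by rintro ⟨⟨h1, _⟩, _⟩; exact hone h1)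

theorem F1_iff (floor : List Int) (wp : Int) (k : Nat) :
    ((∃ x ∈ PySem.List.pyRange 0 ((floor.length : Int) - wp) 1, C1 floor wp (floor.length : Int) x k) ∧
      k < floor.length) ↔ F1 floor wp k := by
  constructor
  · rintro ⟨⟨x, hxm, hone, w, hw1, hw2, hw3, hw4, hk1, hk2⟩, hk3⟩
    have hxr := PySem.List.mem_pyRange_one.mp hxm
    have hw0 : 0 ≤ w := by omega
    refine ⟨x.toNat, w.toNat, ⟨by omega, by omega, (iOne_iff_pvOne (by omega)).mp hone,
      (iOne_iff_pvOne hw0).mp hw3, fun c hc1 hc2 hc3 => ?_⟩, by omega, by omega, by omega, by omega⟩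
    exact hw4 (c : Int) (by omega) (by omega) ((iOne_iff_pvOne (by omega)).mpr (by simpa using hc3))
  · rintro ⟨a, b, ⟨hab, hblen, ha1, hb1, hbet⟩, hcond1, hcond2, hk1, hk2⟩
    refine ⟨⟨(a : Int), PySem.List.mem_pyRange_one.mpr ⟨by omega, by omega⟩,
      (iOne_iff_pvOne (by omega)).mpr (by simpa using ha1), (b : Int), by omega, by omega,
      (iOne_iff_pvOne (by omega)).mpr (by simpa using hb1), fun c hc1 hc2 hc3 => ?_, by omega, by omega⟩, by omega⟩
    exact hbet c.toNat (by omega) (by omega) ((iOne_iff_pvOne (by omega)).mp hc3)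

-- B side: bOnes and adjacency
theorem mem_bOnes {l : List Int} {x : Int} : x ∈ bOnes l ↔ ∃ k : Nat, x = (k : Int) ∧ pvOne l k := by
  unfold bOnes
  rw [List.mem_filterMap]
  constructor
  · rintro ⟨iv, hmem, hf⟩
    obtain ⟨k, hk, rfl⟩ := (PySem.List.mem_enumerate_iff l 0 iv).mp hmem
    by_cases h1 : l[k] = 1
    · simp only [h1, if_pos] at hf
      refine ⟨k, by simpa using hf.symm, ?_⟩
      rw [pvOne, List.getD_eq_getElem l 0 hk, h1]
    · simp [h1] at hf
  · rintro ⟨k, rfl, hone⟩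
    have hk : k < l.length := pvOne_lt_length hone
    refine ⟨(0 + (k : Int), l[k]), (PySem.List.mem_enumerate_iff l 0 _).mpr ⟨k, hk, rfl⟩, ?_⟩
    have h1 : l[k] = 1 := by rwa [pvOne, List.getD_eq_getElem l 0 hk] at hone
    simp [h1]

theorem bOnes_pairwise (l : List Int) : (bOnes l).Pairwise (· < ·) := by
  unfold bOnes
  refine List.Pairwise.filterMap _ ?_ (PySem.List.pairwise_lt_enumerate l 0)
  rintro a a' h b hb b' hb'
  by_cases h1 : a.2 = 1 <;> by_cases h2 : a'.2 = 1 <;> simp [h1, h2] at hb hb'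
  omega

theorem pairs_zip_adjacent {xs : List Int} (hs : xs.Pairwise (· < ·)) {a b : Int} :
    (a, b) ∈ xs.zip xs.tail ↔ (a ∈ xs ∧ b ∈ xs ∧ a < b ∧ ∀ c ∈ xs, ¬(a < c ∧ c < b)) := by
  induction xs with
  | nil => simp
  | cons x t ih =>
    match t, hs with
    | [], _ => simp; rintro rfl rfl; omega
    | y :: t', hs =>
      have hxall := (List.pairwise_cons.mp hs).1
      have hst := (List.pairwise_cons.mp hs).2
      have hyall := (List.pairwise_cons.mp hst).1
      constructor
      · intro hmem
        rcases List.mem_cons.mp hmem with heq | hmem'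
        · obtain ⟨ha', hb'⟩ := Prod.mk.inj heq
          have hxy : x < y := hxall y (by simp)
          refine ⟨by rw [ha']; simp, by rw [hb']; simp, by omega, ?_⟩
          intro c hc
          rw [ha', hb']
          rcases List.mem_cons.mp hc with rfl | hc'
          · omega
          · rcases List.mem_cons.mp hc' with rfl | hc''
            · omega
            · have := hyall c hc''; omega
        · have hadj := (ih hst).mp (by simpa using hmem')
          refine ⟨by simp [hadj.1], by simp [hadj.2.1], hadj.2.2.1, ?_⟩
          intro c hc
          rcases List.mem_cons.mp hc with rfl | hc'
          · have := hxall a hadj.1; omega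
          · exact hadj.2.2.2 c hc'
      · rintro ⟨ha, hb, hab, hbet⟩
        rcases List.mem_cons.mp ha with rfl | ha'
        · have hbt : b ∈ y :: t' := by
            rcases List.mem_cons.mp hb with rfl | hb'
            · omega
            · exact hb'
          have hby : b = y := by
            rcases List.mem_cons.mp hbt with rfl | hb''
            · rfl
            · have h1 := hxall y (by simp)
              have h2 := hyall b hb''
              exact absurd ⟨h1, h2⟩ (hbet y (by simp))
          subst hby
          simp
        · have hbt : b ∈ y :: t' := by
            rcases List.mem_cons.mp hb with rfl | hb'
            · have := hxall a ha'; omega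
            · exact hb'
          have : (a, b) ∈ (y :: t').zip ((y :: t').tail) := by
            refine (ih hst).mpr ⟨ha', hbt, hab, fun c hc => hbet c (by simp [hc])⟩
          have h2 : (a, b) ∈ (y :: t').zip t' := by simpa using this
          simp [h2]

theorem zip_bOnes_iff {l : List Int} {a b : Int} :
    (a, b) ∈ (bOnes l).zip (bOnes l).tail ↔
      ∃ an bn : Nat, a = (an : Int) ∧ b = (bn : Int) ∧ CPair l an bn := by
  rw [pairs_zip_adjacent (bOnes_pairwise l)]
  constructor
  · rintro ⟨ha, hb, hab, hbet⟩
    obtain ⟨an, rfl, han⟩ := mem_bOnes.mp ha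
    obtain ⟨bn, rfl, hbn⟩ := mem_bOnes.mp hb
    refine ⟨an, bn, rfl, rfl, by omega, pvOne_lt_length hbn, han, hbn, fun c hc1 hc2 hc3 => ?_⟩
    exact hbet (c : Int) (mem_bOnes.mpr ⟨c, rfl, hc3⟩) ⟨by omega, by omega⟩
  · rintro ⟨an, bn, rfl, rfl, hab, hblen, ha1, hb1, hbet⟩
    refine ⟨mem_bOnes.mpr ⟨an, rfl, ha1⟩, mem_bOnes.mpr ⟨bn, rfl, hb1⟩, by omega, ?_⟩
    rintro c hc ⟨hc1, hc2⟩
    obtain ⟨cn, rfl, hcn⟩ := mem_bOnes.mp hc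
    exact hbet cn (by omega) (by omega) hcn

theorem bPass1_PW (floor : List Int) (wp n : Int) :
    PW (bPass1 floor wp n) floor
      (fun k => (∃ ab ∈ (bOnes floor).zip (bOnes floor).tail,
        (ab.1 < n - wp ∧ ab.2 - ab.1 < wp) ∧ ab.1 < (k : Int) ∧ (k : Int) < ab.2) ∧
        k < floor.length) 1 := by
  apply foldl_cw
  intro p ab hab
  obtain ⟨an, bn, ha, hb, hcp⟩ := zip_bOnes_iff.mp hab
  by_cases hcond : ab.1 < n - wp ∧ ab.2 - ab.1 < wp
  · rw [if_pos hcond]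
    refine ⟨length_pvFill _ _, fun k => ?_⟩
    have hz : ∀ z ∈ PySem.List.pyRange (ab.1 + 1) ab.2 1, 0 ≤ z := by
      intro z hzm; have := PySem.List.mem_pyRange_one.mp hzm; omega
    rw [getD_pvFill _ _ hz k]
    constructor
    · rintro ⟨⟨_, hk1, hk2⟩, hk3⟩
      rw [if_pos ⟨PySem.List.mem_pyRange_one.mpr ⟨by omega, by omega⟩, hk3⟩]
    · intro hno
      rw [if_neg]
      rintro ⟨hmem, hk3⟩
      have := PySem.List.mem_pyRange_one.mp hmem
      exact hno ⟨⟨hcond, by omega, by omega⟩, hk3⟩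
  · rw [if_neg hcond]
    exact PW_of_no_write (fun k => by rintro ⟨⟨h1, _⟩, _⟩; exact hcond h1)

theorem B1_iff (floor : List Int) (wp : Int) (k : Nat) :
    ((∃ ab ∈ (bOnes floor).zip (bOnes floor).tail,
        (ab.1 < (floor.length : Int) - wp ∧ ab.2 - ab.1 < wp) ∧ ab.1 < (k : Int) ∧ (k : Int) < ab.2) ∧
      k < floor.length) ↔ F1 floor wp k := by
  constructor
  · rintro ⟨⟨ab, hab, ⟨hc1, hc2⟩, hk1, hk2⟩, hk3⟩
    obtain ⟨an, bn, ha, hb, hcp⟩ := zip_bOnes_iff.mp hab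
    exact ⟨an, bn, hcp, by omega, by omega, by omega, by omega⟩
  · rintro ⟨a, b, hcp, hc1, hc2, hk1, hk2⟩
    have := hcp.2.1
    refine ⟨⟨((a : Int), (b : Int)), zip_bOnes_iff.mpr ⟨a, b, rfl, rfl, hcp⟩,
      ⟨by omega, by omega⟩, by omega, by omega⟩, by omega⟩

theorem pass1_eq (floor : List Int) (wp : Int) :
    aPass1 floor wp (floor.length : Int) = bPass1 floor wp (floor.length : Int) :=
  eq_of_PW (PW_congr (aPass1_PW floor wp _) (F1_iff floor wp))
    (PW_congr (bPass1_PW floor wp _) (B1_iff floor wp))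

theorem pass1_PW (floor : List Int) (wp : Int) :
    PW (aPass1 floor wp (floor.length : Int)) floor (F1 floor wp) 1 :=
  PW_congr (aPass1_PW floor wp _) (F1_iff floor wp)

-- ---------- pass 2 ----------

-- positions filled by pass 2 while the downward scan stands at x: interiors of consecutive pairs
-- (a,b) of p with b ≥ wp+1, b-a < wp whose upper end b was already visited (b > x)
def F2 (p : List Int) (wp x : Int) (k : Nat) : Prop :=
  ∃ a b : Nat, CPair p a b ∧ wp + 1 ≤ (b : Int) ∧ (b : Int) - (a : Int) < wp ∧
    x < (b : Int) ∧ a < k ∧ k < b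

theorem PW_trans {c' c p : List Int} {Q P : Nat → Prop} {v : Int}
    (h1 : PW c' c Q v) (h2 : PW c p P v) : PW c' p (fun k => Q k ∨ P k) v := by
  refine ⟨h1.1.trans h2.1, fun k => ⟨?_, ?_⟩⟩
  · rintro (hq | hp)
    · exact (h1.2 k).1 hq
    · by_cases hq : Q k
      · exact (h1.2 k).1 hq
      · rw [(h1.2 k).2 hq]; exact (h2.2 k).1 hp
  · intro hno
    rw [(h1.2 k).2 (fun hq => hno (Or.inl hq)), (h2.2 k).2 (fun hp => hno (Or.inr hp))]

theorem PW_one_iff {c p : List Int} {P : Nat → Prop} (h : PW c p P 1) (k : Nat) :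
    c.getD k 0 = 1 ↔ P k ∨ p.getD k 0 = 1 := by
  by_cases hp : P k
  · rw [(h.2 k).1 hp]; exact ⟨fun _ => Or.inl hp, fun _ => rfl⟩
  · rw [(h.2 k).2 hp]; exact ⟨fun h1 => Or.inr h1, fun h1 => h1.resolve_left hp⟩

theorem aLook2_PW (c : List Int) (x stop y : Int) (hstop : -1 ≤ stop) (hyx : y < x) :
    PW (aLook2 c x stop y) c
      (fun k => (∃ w : Int, stop < w ∧ w ≤ y ∧ iOne c w ∧
        (∀ j : Int, w < j → j ≤ y → ¬ iOne c j) ∧ w < (k : Int) ∧ (k : Int) < x) ∧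
        k < c.length) 1 := by
  fun_induction aLook2 c x stop y with
  | case1 y hgt hone =>
    refine ⟨length_pvFill _ _, fun k => ?_⟩
    have hz : ∀ z ∈ PySem.List.pyRange (x - 1) y (-1), 0 ≤ z := by
      intro z hzm; have := PySem.List.mem_pyRange_neg_one.mp hzm; omega
    rw [getD_pvFill _ _ hz k]
    constructor
    · rintro ⟨⟨w, hw1, hw2, hw3, hw4, hk1, hk2⟩, hk3⟩
      have hwy : w = y := by
        by_contra hne
        exact hw4 y (by omega) (le_refl y) hone
      rw [if_pos ⟨PySem.List.mem_pyRange_neg_one.mpr ⟨by omega, by omega⟩, hk3⟩]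
    · intro hno
      rw [if_neg]
      rintro ⟨hmem, hk3⟩
      have := PySem.List.mem_pyRange_neg_one.mp hmem
      exact hno ⟨⟨y, hgt, le_refl y, hone, fun j hj1 hj2 => by omega, by omega, by omega⟩, hk3⟩
  | case2 y hgt hone ih =>
    refine PW_congr (ih (by omega)) (fun k => ?_)
    constructor
    · rintro ⟨⟨w, hw1, hw2, hw3, hw4, hk1, hk2⟩, hk3⟩
      refine ⟨⟨w, hw1, by omega, hw3, fun j hj1 hj2 => ?_, hk1, hk2⟩, hk3⟩
      by_cases hjy : j = y
      · rw [hjy]; exact hone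
      · exact hw4 j hj1 (by omega)
    · rintro ⟨⟨w, hw1, hw2, hw3, hw4, hk1, hk2⟩, hk3⟩
      have hwy : w ≠ y := fun h => hone (h ▸ hw3)
      exact ⟨⟨w, hw1, by omega, hw3, fun j hj1 hj2 => hw4 j hj1 (by omega), hk1, hk2⟩, hk3⟩
  | case3 y hle =>
    exact PW_of_no_write (fun k => by rintro ⟨⟨w, hw1, hw2, _⟩, _⟩; omega)

-- pairs of p with upper end exactly x
def F2at (p : List Int) (wp x : Int) (k : Nat) : Prop :=
  ∃ a : Nat, CPair p a x.toNat ∧ x - (a : Int) < wp ∧ a < k ∧ k < x.toNat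

theorem F2_split (p : List Int) (wp x : Int) (hx : wp < x) (k : Nat) :
    F2 p wp (x - 1) k ↔ F2 p wp x k ∨ F2at p wp x k := by
  constructor
  · rintro ⟨a, b, hcp, h1, h2, h3, h4, h5⟩
    by_cases hbx : (b : Int) = x
    · exact Or.inr ⟨a, by rwa [show x.toNat = b by omega], by omega, h4, by omega⟩
    · exact Or.inl ⟨a, b, hcp, h1, h2, by omega, h4, h5⟩
  · rintro (⟨a, b, hcp, h1, h2, h3, h4, h5⟩ | ⟨a, hcp, h1, h2, h3⟩)
    · exact ⟨a, b, hcp, h1, h2, by omega, h4, h5⟩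
    · refine ⟨a, x.toNat, hcp, by omega, by omega, by omega, h2, h3⟩

-- below a position x that holds a 1 in p, the scan has changed nothing yet
theorem F2_below {p : List Int} {wp x : Int} {k : Nat} (hx : 0 ≤ x)
    (hone : pvOne p x.toNat) (hk : (k : Int) < x) : ¬ F2 p wp x k := by
  rintro ⟨a, b, ⟨hab, hblen, ha1, hb1, hbet⟩, h1, h2, h3, h4, h5⟩
  exact hbet x.toNat (by omega) (by omega) hone

theorem aPass2_PW (p : List Int) (wp : Int) (hwp : 0 ≤ wp) :
    ∀ m : Nat, ∀ x c, (x - wp).toNat = m → PW c p (F2 p wp x) 1 →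
      PW (aPass2 wp c x) p (F2 p wp wp) 1 := by
  intro m
  induction m using Nat.strong_induction_on with
  | _ m ih =>
    intro x c hm hc
    rw [aPass2]
    by_cases hx : x > wp
    · rw [if_pos hx]
      have hlen : c.length = p.length := hc.1
      -- the written-below-x translation: c agrees with p strictly below x when p has a 1 at x
      refine ih (m - 1) (by omega) (x - 1) _ (by omega) ?_
      by_cases hcx : PySem.List.pyGetD c x 0 = 1
      · rw [if_pos hcx]
        have hcx' : c.getD x.toNat 0 = 1 := by rwa [pyGetD_toNat _ _ _ (by omega)] at hcx
        by_cases hpx : pvOne p x.toNat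
        · -- x is an original 1 of p: the backward search sees exactly p
          have hbelow : ∀ j : Int, 0 ≤ j → j < x → (iOne c j ↔ iOne p j) := by
            intro j hj0 hjx
            rw [iOne_iff_pvOne hj0, iOne_iff_pvOne hj0, pvOne, pvOne]
            have : ¬ F2 p wp x j.toNat := F2_below (by omega) hpx (by omega)
            rw [(hc.2 j.toNat).2 this]
          have hlook := aLook2_PW c x (max (x - wp) (-1)) (x - 1) (by omega) (by omega)
          refine PW_congr (PW_trans hlook hc) (fun k => ?_)
      -- (Pred ∨ F2 x) ↔ F2 (x-1)
          rw [F2_split p wp x hx k]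
          constructor
          · rintro (⟨⟨w, hw1, hw2, hw3, hw4, hk1, hk2⟩, hk3⟩ | hf2)
            · right
              have hw0 : 0 ≤ w := by omega
              have hpw : pvOne p w.toNat := (iOne_iff_pvOne hw0).mp ((hbelow w hw0 (by omega)).mp hw3)
              refine ⟨w.toNat, ⟨by omega, pvOne_lt_length hpx, hpw, hpx, ?_⟩, by omega, by omega, by omega⟩
              intro j hj1 hj2 hpj
              have hj0 : (0:Int) ≤ (j:Int) := by omega
              exact hw4 (j:Int) (by omega) (by omega) ((hbelow (j:Int) hj0 (by omega)).mpr ((iOne_iff_pvOne hj0).mpr (by simpa using hpj)))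
            · exact Or.inl hf2
          · rintro (hf2 | ⟨a, ⟨hab, hblen, ha1, hb1, hbet⟩, h1, h2, h3⟩)
            · exact Or.inr hf2
            · left
              have ha0 : (0:Int) ≤ (a:Int) := by omega
              refine ⟨⟨(a:Int), by omega, by omega,
                (hbelow (a:Int) ha0 (by omega)).mpr ((iOne_iff_pvOne ha0).mpr (by simpa using ha1)), ?_, by omega, by omega⟩, by omega⟩
              intro j hj1 hj2 hcj
              have hj0 : (0:Int) ≤ j := by omega
              have hpj : pvOne p j.toNat := (iOne_iff_pvOne hj0).mp ((hbelow j hj0 (by omega)).mp hcj)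
              exact hbet j.toNat (by omega) (by omega) hpj
        · -- x lies inside an already filled gap: the step is a no-op
          have hf2x : F2 p wp x x.toNat := by
            rcases (PW_one_iff hc x.toNat).mp hcx' with h | h
            · exact h
            · exact absurd h hpx
          obtain ⟨a0, b0, hcp0, hc1, hc2, hc3, hc4, hc5⟩ := hf2x
          have hxm1 : c.getD (x.toNat - 1) 0 = 1 := by
            by_cases hae : a0 = x.toNat - 1
            · rcases (PW_one_iff hc (x.toNat - 1)).mpr (Or.inr (by rw [← hae]; exact hcp0.2.2.1)) with h
              exact h
            · exact (hc.2 (x.toNat - 1)).1 ⟨a0, b0, hcp0, hc1, hc2, hc3, by omega, by omega⟩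
          have hlook := aLook2_PW c x (max (x - wp) (-1)) (x - 1) (by omega) (by omega)
          have hpred : ∀ k : Nat, ¬ ((∃ w : Int, max (x - wp) (-1) < w ∧ w ≤ x - 1 ∧ iOne c w ∧
              (∀ j : Int, w < j → j ≤ x - 1 → ¬ iOne c j) ∧ w < (k : Int) ∧ (k : Int) < x) ∧
              k < c.length) := by
            rintro k ⟨⟨w, hw1, hw2, hw3, hw4, hk1, hk2⟩, hk3⟩
            have hx1 : (0:Int) ≤ x - 1 := by omega
            by_cases hwx : w = x - 1
            · omega
            · exact hw4 (x - 1) (by omega) (le_refl _)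
                (by rw [iOne_iff_pvOne hx1, pvOne, show (x-1).toNat = x.toNat - 1 by omega]; exact hxm1)
          have : ∀ k : Nat, (aLook2 c x (max (x - wp) (-1)) (x - 1)).getD k 0 = c.getD k 0 := by
            intro k; exact (hlook.2 k).2 (hpred k)
          refine PW_congr (PW_trans ⟨hlook.1, fun k => ⟨fun h => absurd h (hpred k), fun _ => this k⟩⟩ hc) (fun k => ?_)
          rw [F2_split p wp x hx k]
          constructor
          · rintro (h | h)
            · exact absurd h (hpred k)
            · exact Or.inl h
          · rintro (h | ⟨a, hcp, _⟩)
            · exact Or.inr h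
            · exact absurd hcp.2.2.2.1 hpx
      · -- c[x] ≠ 1: skip; there is no pair with upper end x
        rw [if_neg hcx]
        refine PW_congr hc (fun k => ?_)
        rw [F2_split p wp x hx k]
        constructor
        · exact Or.inl
        · rintro (h | ⟨a, hcp, _⟩)
          · exact h
          · exact absurd ((PW_one_iff hc x.toNat).mpr (Or.inr hcp.2.2.2.1))
              (by rwa [← pyGetD_toNat _ _ (0:Int) (by omega)])
    · rw [if_neg hx]
      refine PW_congr hc (fun k => ?_)
      constructor
      · rintro ⟨a, b, hcp, h1, h2, h3, h4, h5⟩; exact ⟨a, b, hcp, h1, h2, by omega, h4, h5⟩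
      · rintro ⟨a, b, hcp, h1, h2, h3, h4, h5⟩; exact ⟨a, b, hcp, h1, h2, by omega, h4, h5⟩

theorem bPass2_PW (p : List Int) (wp : Int) :
    PW (bPass2 p wp) p
      (fun k => (∃ ab ∈ (bOnes p).zip (bOnes p).tail,
        (wp + 1 ≤ ab.2 ∧ ab.2 - ab.1 < wp) ∧ ab.1 < (k : Int) ∧ (k : Int) < ab.2) ∧
        k < p.length) 1 := by
  apply foldl_cw
  intro q ab hab
  by_cases hcond : wp + 1 ≤ ab.2 ∧ ab.2 - ab.1 < wp
  · rw [if_pos hcond]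
    obtain ⟨an, bn, ha, hb, hcp⟩ := zip_bOnes_iff.mp hab
    refine ⟨length_pvFill _ _, fun k => ?_⟩
    have hz : ∀ z ∈ PySem.List.pyRange (ab.1 + 1) ab.2 1, 0 ≤ z := by
      intro z hzm; have := PySem.List.mem_pyRange_one.mp hzm; omega
    rw [getD_pvFill _ _ hz k]
    constructor
    · rintro ⟨⟨_, hk1, hk2⟩, hk3⟩
      rw [if_pos ⟨PySem.List.mem_pyRange_one.mpr ⟨by omega, by omega⟩, hk3⟩]
    · intro hno
      rw [if_neg]
      rintro ⟨hmem, hk3⟩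
      have := PySem.List.mem_pyRange_one.mp hmem
      exact hno ⟨⟨hcond, by omega, by omega⟩, hk3⟩
  · rw [if_neg hcond]
    exact PW_of_no_write (fun k => by rintro ⟨⟨h1, _⟩, _⟩; exact hcond h1)

theorem B2_iff (p : List Int) (wp : Int) (k : Nat) :
    ((∃ ab ∈ (bOnes p).zip (bOnes p).tail,
        (wp + 1 ≤ ab.2 ∧ ab.2 - ab.1 < wp) ∧ ab.1 < (k : Int) ∧ (k : Int) < ab.2) ∧
      k < p.length) ↔ F2 p wp wp k := by
  constructor
  · rintro ⟨⟨ab, hab, ⟨hc1, hc2⟩, hk1, hk2⟩, hk3⟩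
    obtain ⟨an, bn, ha, hb, hcp⟩ := zip_bOnes_iff.mp hab
    exact ⟨an, bn, hcp, by omega, by omega, by omega, by omega, by omega⟩
  · rintro ⟨a, b, hcp, h1, h2, h3, h4, h5⟩
    have := hcp.2.1
    refine ⟨⟨((a : Int), (b : Int)), zip_bOnes_iff.mpr ⟨a, b, rfl, rfl, hcp⟩,
      ⟨by omega, by omega⟩, by omega, by omega⟩, by omega⟩

theorem pass2_eq (p : List Int) (wp : Int) (hwp : 0 ≤ wp) :
    aPass2 wp p ((p.length : Int) - 1) = bPass2 p wp := by
  have hstart : PW p p (F2 p wp ((p.length : Int) - 1)) 1 :=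
    PW_of_no_write (fun k => by rintro ⟨a, b, hcp, h1, h2, h3, _⟩; have := hcp.2.1; omega)
  exact eq_of_PW (aPass2_PW p wp hwp _ _ p rfl hstart)
    (PW_congr (bPass2_PW p wp) (B2_iff p wp))

theorem pass2_PW (p : List Int) (wp : Int) (hwp : 0 ≤ wp) :
    PW (aPass2 wp p ((p.length : Int) - 1)) p (F2 p wp wp) 1 :=
  aPass2_PW p wp hwp _ _ p rfl
    (PW_of_no_write (fun k => by rintro ⟨a, b, hcp, h1, h2, h3, _⟩; have := hcp.2.1; omega))

-- ---------- pass 3 ----------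

-- positions removed by pass 3: in-window 1s with no other 1 within distance wp
def R3 (q : List Int) (wp n : Int) (k : Nat) : Prop :=
  pvOne q k ∧ wp ≤ (k : Int) ∧ (k : Int) < n - wp ∧
    ∀ j : Nat, (k : Int) - wp ≤ (j : Int) → (j : Int) ≤ (k : Int) + wp → j ≠ k → ¬ pvOne q j

theorem aHasNb_iff (c : List Int) (x stop y : Int) :
    aHasNb c x stop y = true ↔
      ∃ w : Int, y ≤ w ∧ w < stop ∧ w ≠ x ∧ iOne c w := by
  fun_induction aHasNb c x stop y with
  | case1 y hlt hcond =>
    simp only [true_iff]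
    exact ⟨y, le_refl y, hlt, hcond.1, hcond.2⟩
  | case2 y hlt hcond ih =>
    rw [ih]
    constructor
    · rintro ⟨w, hw1, hw2, hw3, hw4⟩; exact ⟨w, by omega, hw2, hw3, hw4⟩
    · rintro ⟨w, hw1, hw2, hw3, hw4⟩
      by_cases hwy : w = y
      · subst hwy; exact absurd ⟨hw3, hw4⟩ hcond
      · exact ⟨w, by omega, hw2, hw3, hw4⟩
  | case3 y hge =>
    simp only [Bool.false_eq_true, false_iff]
    rintro ⟨w, hw1, hw2, _⟩; omega

theorem aPass3_go (q : List Int) (wp n : Int) (hwp : 0 ≤ wp) (hn : n = (q.length : Int)) :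
    ∀ m : Nat, ∀ t c, ((n - wp) - t).toNat = m → wp ≤ t →
      PW c q (fun k => R3 q wp n k ∧ (k : Int) < t) 0 →
      PW ((PySem.List.pyRange t (n - wp) 1).foldl
        (fun c x =>
          if PySem.List.pyGetD c x 0 = 1 then
            if aHasNb c x (x + wp + 1) (x - wp) then c else PySem.List.pySetD c x 0
          else c) c) q (R3 q wp n) 0 := by
  intro m
  induction m using Nat.strong_induction_on with
  | _ m ih =>
    intro t c hm ht hc
    by_cases hend : n - wp ≤ t
    · rw [PySem.List.pyRange_one_eq_nil hend, List.foldl_nil]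
      refine PW_congr hc (fun k => ?_)
      constructor
      · rintro ⟨h, _⟩; exact h
      · intro h; exact ⟨h, by have := h.2.2.1; omega⟩
    · rw [PySem.List.pyRange_one_cons (by omega), List.foldl_cons]
      have hct : c.getD t.toNat 0 = q.getD t.toNat 0 := (hc.2 t.toNat).2 (by rintro ⟨_, h⟩; omega)
      have hread : PySem.List.pyGetD c t 0 = c.getD t.toNat 0 := pyGetD_toNat _ _ _ (by omega)
      have hwin : pvOne q t.toNat →
          (aHasNb c t (t + wp + 1) (t - wp) = true ↔
            ∃ j : Nat, t - wp ≤ (j : Int) ∧ (j : Int) ≤ t + wp ∧ j ≠ t.toNat ∧ pvOne q j) := by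
        intro hq
        rw [aHasNb_iff]
        constructor
        · rintro ⟨w, hw1, hw2, hw3, hw4⟩
          have hw0 : 0 ≤ w := by omega
          have hcw : c.getD w.toNat 0 = 1 := by rwa [iOne, pyGetD_toNat _ _ _ hw0] at hw4
          have hqw : pvOne q w.toNat := by
            rcases Classical.em (R3 q wp n w.toNat ∧ ((w.toNat : Nat) : Int) < t) with hr | hr
            · rw [(hc.2 w.toNat).1 hr] at hcw; omega
            · rwa [pvOne, ← (hc.2 w.toNat).2 hr]
          exact ⟨w.toNat, by omega, by omega, by omega, hqw⟩
        · rintro ⟨j, hj1, hj2, hj3, hj4⟩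
          refine ⟨(j : Int), by omega, by omega, by omega, ?_⟩
          have hnr : ¬ (R3 q wp n j ∧ ((j : Nat) : Int) < t) := by
            rintro ⟨hr, _⟩
            exact hr.2.2.2 t.toNat (by omega) (by omega) (by omega) hq
          have hcq : c.getD j 0 = q.getD j 0 := (hc.2 j).2 hnr
          rw [iOne, pyGetD_toNat _ _ _ (by omega)]
          have hjn : ((j : Int)).toNat = j := by omega
          rw [hjn, hcq]; exact hj4
      have hnext : ∀ c', PW c' q (fun k => R3 q wp n k ∧ (k : Int) < t + 1) 0 →
          PW ((PySem.List.pyRange (t + 1) (n - wp) 1).foldl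
            (fun c x =>
              if PySem.List.pyGetD c x 0 = 1 then
                if aHasNb c x (x + wp + 1) (x - wp) then c else PySem.List.pySetD c x 0
              else c) c') q (R3 q wp n) 0 :=
        fun c' hc' => ih (m - 1) (by omega) (t + 1) c' (by omega) (by omega) hc'
      by_cases hq : pvOne q t.toNat
      · have hc1 : PySem.List.pyGetD c t 0 = 1 := by rw [hread, hct]; exact hq
        rw [if_pos hc1]
        by_cases hnb : aHasNb c t (t + wp + 1) (t - wp) = true
        · rw [if_pos hnb]
          apply hnext
          refine PW_congr hc (fun k => ?_)
          obtain ⟨j, hj1, hj2, hj3, hj4⟩ := (hwin hq).mp hnb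
          constructor
          · rintro ⟨hr, hk⟩; exact ⟨hr, by omega⟩
          · rintro ⟨hr, hk⟩
            refine ⟨hr, ?_⟩
            by_cases hkt : k = t.toNat
            · subst hkt
              exact absurd hj4 (hr.2.2.2 j (by omega) (by omega) (by omega))
            · omega
        · rw [if_neg hnb]
          apply hnext
          have hr3 : R3 q wp n t.toNat := by
            refine ⟨hq, by omega, by omega, fun j hj1 hj2 hj3 hj4 => ?_⟩
            exact hnb ((hwin hq).mpr ⟨j, by omega, by omega, hj3, hj4⟩)
          have hset : PySem.List.pySetD c t 0 = c.set t.toNat 0 :=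
            PySem.List.pySetD_of_nonneg c 0 (by omega)
          refine ⟨by rw [hset]; simpa using hc.1, fun k => ?_⟩
          rw [hset, getD_set]
          have htlen : t.toNat < c.length := by
            rw [hc.1]; exact pvOne_lt_length hq
          constructor
          · rintro ⟨hr, hk⟩
            by_cases hkt : k = t.toNat
            · rw [if_pos ⟨hkt, by omega⟩]
            · rw [if_neg (by tauto)]
              exact (hc.2 k).1 ⟨hr, by omega⟩
          · intro hno
            have hkt : ¬ k = t.toNat := by
              rintro rfl
              exact hno ⟨hr3, by omega⟩
            rw [if_neg (by tauto)]
            exact (hc.2 k).2 (by rintro ⟨hr, hk⟩; exact hno ⟨hr, by omega⟩)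
      · have hc0 : ¬ PySem.List.pyGetD c t 0 = 1 := by
          rw [hread, hct]; exact hq
        rw [if_neg hc0]
        apply hnext
        refine PW_congr hc (fun k => ?_)
        constructor
        · rintro ⟨hr, hk⟩; exact ⟨hr, by omega⟩
        · rintro ⟨hr, hk⟩
          refine ⟨hr, ?_⟩
          by_cases hkt : k = t.toNat
          · exact absurd (hkt ▸ hr.1) hq
          · omega

theorem aPass3_PW (q : List Int) (wp : Int) (hwp : 0 ≤ wp) :
    PW (aPass3 wp (q.length : Int) q) q (R3 q wp (q.length : Int)) 0 := by
  unfold aPass3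
  exact aPass3_go q wp _ hwp rfl _ wp q rfl (le_refl wp)
    (PW_of_no_write (fun k => by rintro ⟨hr, hk⟩; have := hr.2.1; omega))

-- ---------- B's nearest-1 scans ----------

-- what bLeft stores at position t: the nearest 1 strictly left of t
def PrevSpec (q : List Int) (t : Int) (o : Option Int) : Prop :=
  (o = none ∧ ∀ j : Nat, (j : Int) < t → ¬ pvOne q j) ∨
  (∃ j : Nat, o = some (j : Int) ∧ (j : Int) < t ∧ pvOne q j ∧
    ∀ i : Nat, j < i → (i : Int) < t → ¬ pvOne q i)

def NextSpec (q : List Int) (t : Int) (o : Option Int) : Prop :=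
  (o = none ∧ ∀ j : Nat, t < (j : Int) → ¬ pvOne q j) ∨
  (∃ j : Nat, o = some (j : Int) ∧ t < (j : Int) ∧ pvOne q j ∧
    ∀ i : Nat, t < (i : Int) → i < j → ¬ pvOne q i)

theorem not_pvOne_of_ge {q : List Int} {j : Nat} (h : q.length ≤ j) : ¬ pvOne q j :=
  fun h1 => by have := pvOne_lt_length h1; omega

theorem bLeft_go (q : List Int) (n : Int) (hn : n = (q.length : Int)) :
    ∀ m : Nat, ∀ t : Int, ∀ st : List (Option Int) × Option Int, (n - t).toNat = m → 0 ≤ t →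
      st.1.length = q.length → PrevSpec q t st.2 →
      (∀ k : Nat, (k : Int) < t → PrevSpec q k (st.1.getD k none)) →
      (((PySem.List.pyRange t n 1).foldl
        (fun st i => (PySem.List.pySetD st.1 i st.2,
          if PySem.List.pyGetD q i 0 = 1 then some i else st.2)) st).1.length = q.length ∧
      ∀ k : Nat, k < q.length → PrevSpec q k
        (((PySem.List.pyRange t n 1).foldl
          (fun st i => (PySem.List.pySetD st.1 i st.2,
            if PySem.List.pyGetD q i 0 = 1 then some i else st.2)) st).1.getD k none)) := by
  intro m
  induction m using Nat.strong_induction_on with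
  | _ m ih =>
    intro t st hm ht hlen hlast harr
    by_cases hend : n ≤ t
    · rw [PySem.List.pyRange_one_eq_nil hend, List.foldl_nil]
      exact ⟨hlen, fun k hk => harr k (by omega)⟩
    · rw [PySem.List.pyRange_one_cons (by omega), List.foldl_cons]
      have hset : PySem.List.pySetD st.1 t st.2 = st.1.set t.toNat st.2 :=
        PySem.List.pySetD_of_nonneg st.1 st.2 (by omega)
      have hread : PySem.List.pyGetD q t 0 = q.getD t.toNat 0 := pyGetD_toNat _ _ _ (by omega)
      refine ih (m - 1) (by omega) (t + 1) _ (by omega) (by omega) (by simp [hset, hlen]) ?_ ?_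
      · -- new `last` satisfies PrevSpec (t+1)
        by_cases hq : q.getD t.toNat 0 = 1
        · simp only [hread, hq, if_pos]
          refine Or.inr ⟨t.toNat, by simp [show ((t.toNat : Nat) : Int) = t by omega], by omega, hq, ?_⟩
          intro i hi1 hi2; omega
        · simp only [hread, hq, if_neg, if_false]
          rcases hlast with ⟨ho, hall⟩ | ⟨j, ho, hj1, hj2, hall⟩
          · refine Or.inl ⟨ho, fun j hj => ?_⟩
            by_cases hjt : j = t.toNat
            · rw [hjt]; exact hq
            · exact hall j (by omega)
          · refine Or.inr ⟨j, ho, by omega, hj2, fun i hi1 hi2 => ?_⟩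
            by_cases hit : i = t.toNat
            · rw [hit]; exact hq
            · exact hall i hi1 (by omega)
      · -- array clause for k < t + 1
        intro k hk
        rw [hset, getD_set]
        by_cases hkt : k = t.toNat
        · rw [if_pos ⟨hkt, by rw [hlen]; omega⟩]
          have : ((k : Nat) : Int) = t := by omega
          rw [this]; exact hlast
        · rw [if_neg (by tauto)]
          exact harr k (by omega)

theorem bLeft_spec (q : List Int) (n : Int) (hn : n = (q.length : Int)) :
    (bLeft q n).length = q.length ∧
      ∀ k : Nat, k < q.length → PrevSpec q k ((bLeft q n).getD k none) := by
  unfold bLeft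
  refine bLeft_go q n hn (n - 0).toNat 0 _ rfl (le_refl 0) (by simp; omega)
    (Or.inl ⟨rfl, fun j hj => by omega⟩) (fun k hk => by omega)

theorem bRight_go (q : List Int) (n : Int) (hn : n = (q.length : Int)) :
    ∀ m : Nat, ∀ t : Int, ∀ st : List (Option Int) × Option Int, (t + 1).toNat = m → t ≤ n - 1 →
      st.1.length = q.length → NextSpec q t st.2 →
      (∀ k : Nat, t < (k : Int) → k < q.length → NextSpec q k (st.1.getD k none)) →
      (((PySem.List.pyRange t (-1) (-1)).foldl
        (fun st i => (PySem.List.pySetD st.1 i st.2,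
          if PySem.List.pyGetD q i 0 = 1 then some i else st.2)) st).1.length = q.length ∧
      ∀ k : Nat, k < q.length → NextSpec q k
        (((PySem.List.pyRange t (-1) (-1)).foldl
          (fun st i => (PySem.List.pySetD st.1 i st.2,
            if PySem.List.pyGetD q i 0 = 1 then some i else st.2)) st).1.getD k none)) := by
  intro m
  induction m using Nat.strong_induction_on with
  | _ m ih =>
    intro t st hm ht hlen hlast harr
    by_cases hend : t ≤ -1
    · rw [PySem.List.pyRange_neg_one, show (t - (-1)).toNat = 0 by omega]
      simp only [List.range_zero, List.map_nil, List.foldl_nil]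
      exact ⟨hlen, fun k hk => harr k (by omega) hk⟩
    · rw [PySem.List.pyRange_neg_one_cons (by omega), List.foldl_cons]
      have hset : PySem.List.pySetD st.1 t st.2 = st.1.set t.toNat st.2 :=
        PySem.List.pySetD_of_nonneg st.1 st.2 (by omega)
      have hread : PySem.List.pyGetD q t 0 = q.getD t.toNat 0 := pyGetD_toNat _ _ _ (by omega)
      refine ih (m - 1) (by omega) (t - 1) _ (by omega) (by omega) (by simp [hset, hlen]) ?_ ?_
      · by_cases hq : q.getD t.toNat 0 = 1
        · simp only [hread, hq, if_pos]
          refine Or.inr ⟨t.toNat, by simp [show ((t.toNat : Nat) : Int) = t by omega], by omega, hq, ?_⟩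
          intro i hi1 hi2; omega
        · simp only [hread, hq, if_neg, if_false]
          rcases hlast with ⟨ho, hall⟩ | ⟨j, ho, hj1, hj2, hall⟩
          · refine Or.inl ⟨ho, fun j hj => ?_⟩
            by_cases hjt : j = t.toNat
            · rw [hjt]; exact hq
            · exact hall j (by omega)
          · refine Or.inr ⟨j, ho, by omega, hj2, fun i hi1 hi2 => ?_⟩
            by_cases hit : i = t.toNat
            · rw [hit]; exact hq
            · exact hall i (by omega) hi2
      · intro k hk1 hk2
        rw [hset, getD_set]
        by_cases hkt : k = t.toNat
        · rw [if_pos ⟨hkt, by rw [hlen]; omega⟩]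
          have : ((k : Nat) : Int) = t := by omega
          rw [this]; exact hlast
        · rw [if_neg (by tauto)]
          exact harr k (by omega) hk2

theorem bRight_spec (q : List Int) (n : Int) (hn : n = (q.length : Int)) :
    (bRight q n).length = q.length ∧
      ∀ k : Nat, k < q.length → NextSpec q k ((bRight q n).getD k none) := by
  unfold bRight
  refine bRight_go q n hn (n - 1 + 1).toNat (n - 1) _ rfl (le_refl _) (by simp; omega)
    (Or.inl ⟨rfl, fun j hj => not_pvOne_of_ge (by omega)⟩) (fun k hk1 hk2 => by omega)

theorem near_iff (q : List Int) (wp n : Int) (hn : n = (q.length : Int)) (i : Int)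
    (hi0 : 0 ≤ i) (hilen : i < n) :
    (((match PySem.List.pyGetD (bLeft q n) i none with
        | some j => decide (i - j ≤ wp)
        | none => false) ||
      (match PySem.List.pyGetD (bRight q n) i none with
        | some j => decide (j - i ≤ wp)
        | none => false)) = true) ↔
      ∃ j : Nat, i - wp ≤ (j : Int) ∧ (j : Int) ≤ i + wp ∧ j ≠ i.toNat ∧ pvOne q j := by
  have hL := (bLeft_spec q n hn).2 i.toNat (by omega)
  have hR := (bRight_spec q n hn).2 i.toNat (by omega)
  have hLr : PySem.List.pyGetD (bLeft q n) i none = (bLeft q n).getD i.toNat none :=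
    pyGetD_toNat _ _ _ hi0
  have hRr : PySem.List.pyGetD (bRight q n) i none = (bRight q n).getD i.toNat none :=
    pyGetD_toNat _ _ _ hi0
  rw [hLr, hRr, Bool.or_eq_true]
  constructor
  · rintro (h | h)
    · rcases hL with ⟨ho, hall⟩ | ⟨j, ho, hj1, hj2, hall⟩
      · rw [ho] at h; simp at h
      · rw [ho] at h; simp only [decide_eq_true_eq] at h
        exact ⟨j, by omega, by omega, by omega, hj2⟩
    · rcases hR with ⟨ho, hall⟩ | ⟨j, ho, hj1, hj2, hall⟩
      · rw [ho] at h; simp at h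
      · rw [ho] at h; simp only [decide_eq_true_eq] at h
        exact ⟨j, by omega, by omega, by omega, hj2⟩
  · rintro ⟨j, hj1, hj2, hj3, hj4⟩
    by_cases hlt : (j : Int) < i
    · left
      rcases hL with ⟨ho, hall⟩ | ⟨j', ho, hj'1, hj'2, hall⟩
      · exact absurd hj4 (hall j (by omega))
      · rw [ho]
        have hjj' : j ≤ j' := by
          by_contra hc
          exact hall j (by omega) (by omega) hj4
        simp only [decide_eq_true_eq]; omega
    · right
      have hgt : i < (j : Int) := by omega
      rcases hR with ⟨ho, hall⟩ | ⟨j', ho, hj'1, hj'2, hall⟩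
      · exact absurd hj4 (hall j (by omega))
      · rw [ho]
        have hjj' : j' ≤ j := by
          by_contra hc
          exact hall j (by omega) (by omega) hj4
        simp only [decide_eq_true_eq]; omega

theorem bPass3_PW (q : List Int) (wp n : Int) (hwp : 0 ≤ wp) (hn : n = (q.length : Int)) :
    PW (bPass3 q wp n) q (R3 q wp n) 0 := by
  have hmain := foldl_cw (PySem.List.pyRange 0 n 1)
    (fun out i =>
      if PySem.List.pyGetD q i 0 = 1 ∧ wp ≤ i ∧ i < n - wp then
        if (match PySem.List.pyGetD (bLeft q n) i none with
            | some j => decide (i - j ≤ wp)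
            | none => false) ||
           (match PySem.List.pyGetD (bRight q n) i none with
            | some j => decide (j - i ≤ wp)
            | none => false) then out
        else PySem.List.pySetD out i 0
      else out)
    (fun i k => i = (k : Int) ∧ R3 q wp n k) 0 ?_ q
  · refine PW_congr hmain (fun k => ?_)
    constructor
    · rintro ⟨⟨i, hi, rfl, hr⟩, hk⟩; exact hr
    · intro hr
      have hk : k < q.length := pvOne_lt_length hr.1
      refine ⟨⟨(k : Int), PySem.List.mem_pyRange_one.mpr ⟨by omega, by omega⟩, rfl, hr⟩, hk⟩
  · intro p i hi
    dsimp only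
    have hir := PySem.List.mem_pyRange_one.mp hi
    have hread : PySem.List.pyGetD q i 0 = q.getD i.toNat 0 := pyGetD_toNat _ _ _ (by omega)
    by_cases hcond : PySem.List.pyGetD q i 0 = 1 ∧ wp ≤ i ∧ i < n - wp
    · rw [if_pos hcond]
      by_cases hnear : ((match PySem.List.pyGetD (bLeft q n) i none with
            | some j => decide (i - j ≤ wp)
            | none => false) ||
           (match PySem.List.pyGetD (bRight q n) i none with
            | some j => decide (j - i ≤ wp)
            | none => false)) = true
      · rw [if_pos hnear]
        refine PW_of_no_write (fun k => ?_)
        rintro ⟨⟨rfl, hr⟩, hk⟩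
        obtain ⟨j, hj1, hj2, hj3, hj4⟩ := (near_iff q wp n hn _ (by omega) (by omega)).mp hnear
        exact hr.2.2.2 j (by omega) (by omega) (by omega) hj4
      · rw [if_neg hnear]
        have hr3 : R3 q wp n i.toNat := by
          refine ⟨by rw [pvOne, ← hread]; exact hcond.1, by omega, by omega, fun j hj1 hj2 hj3 hj4 => ?_⟩
          exact hnear ((near_iff q wp n hn _ (by omega) (by omega)).mpr
            ⟨j, by omega, by omega, hj3, hj4⟩)
        have hset : PySem.List.pySetD p i 0 = p.set i.toNat 0 :=
          PySem.List.pySetD_of_nonneg p 0 (by omega)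
        refine ⟨by rw [hset]; simp, fun k => ?_⟩
        rw [hset, getD_set]
        constructor
        · rintro ⟨⟨hik, hr⟩, hk⟩
          have hki : k = i.toNat := by omega
          rw [if_pos ⟨hki, hk⟩]
        · intro hno
          rw [if_neg]
          rintro ⟨hik, hk⟩
          have hik' : i = (k : Int) := by omega
          exact hno ⟨⟨hik', by rwa [show i.toNat = k by omega] at hr3⟩, hk⟩
    · rw [if_neg hcond]
      refine PW_of_no_write (fun k => ?_)
      rintro ⟨⟨rfl, hr⟩, hk⟩
      refine hcond ⟨?_, by have := hr.2.1; omega, by have := hr.2.2.1; omega⟩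
      rw [hread]
      have : ((k : Int)).toNat = k := by omega
      rw [this]; exact hr.1

theorem pass3_eq (q : List Int) (wp : Int) (hwp : 0 ≤ wp) :
    aPass3 wp (q.length : Int) q = bPass3 q wp (q.length : Int) :=
  eq_of_PW (aPass3_PW q wp hwp) (bPass3_PW q wp _ hwp rfl)

-- ===== VERDICT (by name: the statement is the Claim_ definition above) =====
theorem pad_movement_spec : Claim_equal_pad_movement := by
  intro floor wp _hdom hpre
  have hwp : 0 ≤ wp := hpre
  unfold Spec_pad_movement pad_movement pad_movement_alt
  simp only [PySem.List.len_eq]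
  rw [← pass1_eq floor wp]
  have hp1len : (aPass1 floor wp (floor.length : Int)).length = floor.length :=
    (pass1_PW floor wp).1
  have h2 : bPass2 (aPass1 floor wp (floor.length : Int)) wp =
      aPass2 wp (aPass1 floor wp (floor.length : Int)) ((floor.length : Int) - 1) := by
    rw [← pass2_eq _ wp hwp, hp1len]
  rw [h2]
  have hq2len : (aPass2 wp (aPass1 floor wp (floor.length : Int)) ((floor.length : Int) - 1)).length
      = floor.length := by
    have := (pass2_PW (aPass1 floor wp (floor.length : Int)) wp hwp).1
    rwa [hp1len] at this
  have h3 := pass3_eq (aPass2 wp (aPass1 floor wp (floor.length : Int)) ((floor.length : Int) - 1)) wp hwp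
  rwa [hq2len] at h3
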